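-- pv_equiv track=rewrite | github.com/franflori/Datasciencie | basico/ejercicio_20.py | mas_larga_cadena
-- ===== SOURCE A (Python) =====
-- def mas_larga_cadena(lista):
--     maximo=0
--     masLarga=[]
--     for x in lista:
--
--         if(len(x)>maximo):
--             masLarga=[]
--             maximo=len(x)
--             masLarga.append(x)
--         elif(len(x)==maximo):
--             masLarga.append(x)
--
--
--
--     return masLarga
-- ===== SOURCE B (Python) =====
-- def mas_larga_cadena(lista):
--     m = max((len(x) for x in lista), default=0)
--     return [x for x in lista if len(x) == m]
-- ===== Notes on version B (the rewrite author's own statement) =====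
-- stated objective: simpler
-- what changed: Replaces A's single running-max-with-reset loop over a mutable accumulator by two sequential passes: compute the maximum length (default 0), then filter the list for strings of that length.
import Mathlib
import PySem

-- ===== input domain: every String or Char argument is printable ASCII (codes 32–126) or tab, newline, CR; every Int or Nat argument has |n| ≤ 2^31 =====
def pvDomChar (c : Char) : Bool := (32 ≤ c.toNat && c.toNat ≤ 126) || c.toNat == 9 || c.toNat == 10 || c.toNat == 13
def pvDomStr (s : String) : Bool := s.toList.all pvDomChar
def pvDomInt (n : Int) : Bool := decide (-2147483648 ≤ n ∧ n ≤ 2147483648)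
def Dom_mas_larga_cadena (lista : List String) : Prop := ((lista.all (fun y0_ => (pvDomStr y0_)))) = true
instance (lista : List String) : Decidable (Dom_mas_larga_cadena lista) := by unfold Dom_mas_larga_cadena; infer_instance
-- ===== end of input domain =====

-- B replaces A's running-max-with-reset loop by two passes (max length, then filter); same cost, simpler decomposition.


-- ===== PORT A =====
-- A's loop: state (maximo, masLarga); '>' resets the accumulator, '==' appends.
def masLargaLoop : List String → Int → List String → List String
  | [], _, masLarga => masLarga
  | x :: xs, maximo, masLarga =>
    if PySem.Str.len x > maximo then
      masLargaLoop xs (PySem.Str.len x) [x]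
    else if PySem.Str.len x == maximo then
      masLargaLoop xs maximo (masLarga ++ [x])
    else
      masLargaLoop xs maximo masLarga

def mas_larga_cadena (lista : List String) : List String :=
  masLargaLoop lista 0 []

-- ===== PORT B =====
-- max((len(x) for x in lista), default=0) ported as a left fold of max from 0 (exact: lengths are ≥ 0).
def mas_larga_cadena_alt (lista : List String) : List String :=
  let m := lista.foldl (fun a x => max a (PySem.Str.len x)) 0
  lista.filter (fun x => PySem.Str.len x == m)

-- ===== PRECONDITION & SPEC =====
def Spec_mas_larga_cadena (lista : List String) (out : List String) : Prop := out = mas_larga_cadena_alt lista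
instance (lista : List String) (out : List String) : Decidable (Spec_mas_larga_cadena lista out) := by unfold Spec_mas_larga_cadena; infer_instance

-- ===== CLAIM (what is proved, stated in full; the proofs are below) =====
def Claim_equal_mas_larga_cadena : Prop := ∀ (lista : List String), Dom_mas_larga_cadena lista → Spec_mas_larga_cadena lista (mas_larga_cadena lista)

-- ===== LEMMAS AND PROOFS =====
def fmax (xs : List String) (m : Int) : Int :=
  xs.foldl (fun a x => max a (PySem.Str.len x)) m

theorem le_fmax (xs : List String) (m : Int) : m ≤ fmax xs m := by
  induction xs generalizing m with
  | nil => simp [fmax]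
  | cons x xs ih =>
    have := ih (max m (PySem.Str.len x))
    simp only [fmax, List.foldl] at *
    exact le_trans (le_max_left _ _) this

theorem masLargaLoop_eq (xs : List String) (m : Int) (acc : List String) :
    masLargaLoop xs m acc =
      (if fmax xs m = m then acc else []) ++
        xs.filter (fun x => PySem.Str.len x == fmax xs m) := by
  induction xs generalizing m acc with
  | nil => simp [masLargaLoop, fmax]
  | cons x xs ih =>
    have hfm : fmax (x :: xs) m = fmax xs (max m (PySem.Str.len x)) := rfl
    have h2 := le_fmax xs (max m (PySem.Str.len x))
    have h3 : m ≤ max m (PySem.Str.len x) := le_max_left _ _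
    have h4 : PySem.Str.len x ≤ max m (PySem.Str.len x) := le_max_right _ _
    simp only [masLargaLoop, gt_iff_lt, beq_iff_eq]
    rcases lt_trichotomy m (PySem.Str.len x) with h | h | h
    · have hmax : max m (PySem.Str.len x) = PySem.Str.len x := max_eq_right h.le
      rw [if_pos h, ih, hfm, hmax, List.filter_cons]
      rw [hmax] at h2
      by_cases hE : fmax xs (PySem.Str.len x) = PySem.Str.len x
      · rw [if_pos hE, if_neg (by omega : ¬ fmax xs (PySem.Str.len x) = m),
          if_pos (by simp only [beq_iff_eq]; omega : (PySem.Str.len x == fmax xs (PySem.Str.len x)) = true)]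
        rfl
      · rw [if_neg hE, if_neg (by omega : ¬ fmax xs (PySem.Str.len x) = m),
          if_neg (by simp only [beq_iff_eq]; omega : ¬ (PySem.Str.len x == fmax xs (PySem.Str.len x)) = true)]
    · have hmax : max m (PySem.Str.len x) = m := by omega
      rw [if_neg (by omega : ¬ m < PySem.Str.len x), if_pos h.symm, ih, hfm, hmax, List.filter_cons]
      rw [hmax] at h2
      by_cases hF : fmax xs m = m
      · rw [if_pos hF, if_pos hF,
          if_pos (by simp only [beq_iff_eq]; omega : (PySem.Str.len x == fmax xs m) = true)]
        simp only [List.append_assoc, List.singleton_append]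
      · rw [if_neg hF, if_neg hF,
          if_neg (by simp only [beq_iff_eq]; omega : ¬ (PySem.Str.len x == fmax xs m) = true)]
    · have hmax : max m (PySem.Str.len x) = m := max_eq_left h.le
      rw [if_neg (by omega : ¬ m < PySem.Str.len x), if_neg (by omega : ¬ PySem.Str.len x = m),
        ih, hfm, hmax, List.filter_cons]
      rw [hmax] at h2
      rw [if_neg (by simp only [beq_iff_eq]; omega : ¬ (PySem.Str.len x == fmax xs m) = true)]

-- ===== VERDICT (by name: the statement is the Claim_ definition above) =====
theorem mas_larga_cadena_spec : Claim_equal_mas_larga_cadena := by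
  intro lista _
  show mas_larga_cadena lista = mas_larga_cadena_alt lista
  rw [mas_larga_cadena, masLargaLoop_eq, mas_larga_cadena_alt]
  rw [show lista.foldl (fun a x => max a (PySem.Str.len x)) 0 = fmax lista 0 from rfl]
  simp only [ite_self, List.nil_append]
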